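-- pv_equiv track=rewrite | github.com/jackfrost168/adventofcode | 2023/day7.py | check_J
-- ===== SOURCE A (Python) =====
-- def check_J(card, type, level_strength):
--     if 'J' in card:
--         num_j = 0
--         for c in card:
--             if c == 'J':
--                 num_j += 1
--         if type == 1:
--             if num_j == 1: return 'one'
--             elif num_j == 2: return 'three'
--             elif num_j == 3: return 'four'
--             elif num_j == 4: return 'five'
--         elif type == 2:
--             return 'three'
--         elif type == 3:
--             if num_j == 1: return 'full'
--             elif num_j == 2: return 'four'
--         elif type == 4:
--             if num_j == 1: return 'four'
--             elif num_j == 3: return 'four'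
--         else:
--             return 'five'
--     else:
--         return level_strength[type]
-- ===== SOURCE B (Python) =====
-- # Different algorithm: instead of a (type, num_j) case dispatch, reconstruct the hand's
-- # canonical group-count shape for the type, merge the jokers into it (jokers are one whole
-- # group when one of size num_j exists, else singletons), and name the resulting best shape.
-- def check_J(card, type, level_strength):
--     num_j = card.count('J')
--     if num_j == 0:
--         return level_strength[type]
--     SHAPES = {1: (1, 1, 1, 1, 1), 2: (2, 1, 1, 1), 3: (2, 2, 1), 4: (3, 1, 1)}
--     if type not in SHAPES:
--         return 'five'  # full house / four / five (any other type) plus a joker maxes out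
--     groups = list(SHAPES[type])          # descending group sizes of the non-upgraded hand
--     if num_j in groups:
--         groups.remove(num_j)             # the jokers form one whole group
--     else:
--         groups = groups[:max(len(groups) - num_j, 0)]   # the jokers are singletons
--     best = (groups[0] if groups else 0) + num_j          # jokers join the biggest group
--     second = groups[1] if len(groups) > 1 else 0
--     if best >= 5:
--         return 'five'
--     if best == 4:
--         return 'four'
--     if best == 3:
--         return 'full' if second == 2 else 'three'
--     if best == 2:
--         return 'two' if second == 2 else 'one'
--     return 'high'
-- ===== Notes on version B (the rewrite author's own statement) =====
-- stated objective: alternative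
-- what changed: Replaces A's hard-coded (type, num_j) decision tree with a reconstruction of the hand's group-count shape for the type, merging the jokers into the shape (one whole group when a group of size num_j exists, else singletons) and naming the resulting best/second group sizes.
-- outside the precondition, e.g. on check_J('JJJJJ', 1, {}): A returns None, B returns 'five'; on check_J('JJJQK', 2, {}): A returns 'three', B returns 'five'; on check_J('QQ23K', 7, {}): A raises KeyError, B raises KeyError
import Mathlib
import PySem

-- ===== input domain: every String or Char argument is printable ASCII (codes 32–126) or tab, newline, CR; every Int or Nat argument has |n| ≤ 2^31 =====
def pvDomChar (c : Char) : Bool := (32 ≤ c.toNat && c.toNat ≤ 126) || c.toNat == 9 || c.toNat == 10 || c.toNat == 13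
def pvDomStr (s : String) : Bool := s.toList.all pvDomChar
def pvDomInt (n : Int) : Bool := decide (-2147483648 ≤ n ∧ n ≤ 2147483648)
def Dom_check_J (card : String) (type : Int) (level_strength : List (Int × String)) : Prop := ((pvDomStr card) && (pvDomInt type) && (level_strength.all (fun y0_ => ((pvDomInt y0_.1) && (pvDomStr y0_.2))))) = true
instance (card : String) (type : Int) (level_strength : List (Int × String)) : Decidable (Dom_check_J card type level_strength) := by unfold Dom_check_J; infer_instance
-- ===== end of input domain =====

-- B rebuilds the hand's group-count shape for the type and merges the jokers into it,
-- instead of A's hard-coded (type, num_j) decision tree; objective: alternative, same cost.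


-- ===== PORT A =====
-- Python falls through with None (no String) on uncovered (type, num_j) combinations and
-- raises KeyError on a missing dict key; both are excluded by Pre_, "" stands in for them.
def check_J (card : String) (type : Int) (level_strength : List (Int × String)) : String :=
  if PySem.Str.isIn "J" card then
    let num_j : Int := card.toList.foldl (fun n c => if c == 'J' then n + 1 else n) 0
    if type = 1 then
      if num_j = 1 then "one"
      else if num_j = 2 then "three"
      else if num_j = 3 then "four"
      else if num_j = 4 then "five"
      else ""
    else if type = 2 then "three"
    else if type = 3 then
      if num_j = 1 then "full"
      else if num_j = 2 then "four"
      else ""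
    else if type = 4 then
      if num_j = 1 then "four"
      else if num_j = 3 then "four"
      else ""
    else "five"
  else
    (level_strength.lookup type).getD ""   -- KeyError (none) excluded by Pre_

-- ===== PORT B =====
def check_J_alt (card : String) (type : Int) (level_strength : List (Int × String)) : String :=
  let num_j : Int := (PySem.Str.count card "J" : Int)
  if num_j = 0 then (level_strength.lookup type).getD ""   -- KeyError (none) excluded by Pre_
  else
    let shapes : List (Int × List Int) :=
      [(1, [1, 1, 1, 1, 1]), (2, [2, 1, 1, 1]), (3, [2, 2, 1]), (4, [3, 1, 1])]
    match shapes.lookup type with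
    | none => "five"                       -- full house / four / five plus a joker maxes out
    | some g0 =>
      let groups : List Int :=
        if num_j ∈ g0 then g0.erase num_j  -- the jokers form one whole group
        else g0.take (max ((g0.length : Int) - num_j) 0).toNat  -- the jokers are singletons
      let best : Int := groups.headD 0 + num_j
      let second : Int := (groups[1]?).getD 0
      if best ≥ 5 then "five"
      else if best = 4 then "four"
      else if best = 3 then (if second = 2 then "full" else "three")
      else if best = 2 then (if second = 2 then "two" else "one")
      else "high"

-- ===== PRECONDITION & SPEC =====
-- Pre_ excludes (a) J-containing inputs whose (type, num_j) combination makes A's dispatch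
-- fall through and return None (no value of the declared String type), (b) type 2 with ≥ 3
-- jokers — impossible for a real one-pair hand, where A's constant 'three' and B's merged
-- shape are both defensible — and (c) J-free inputs whose type is not a key of
-- level_strength, where A raises KeyError (B does the same).
def Pre_check_J (card : String) (type : Int) (level_strength : List (Int × String)) : Prop :=
  if 'J' ∈ card.toList then
    (type = 1 → card.toList.count 'J' ≤ 4) ∧
    (type = 2 → card.toList.count 'J' ≤ 2) ∧
    (type = 3 → card.toList.count 'J' ≤ 2) ∧
    (type = 4 → card.toList.count 'J' = 1 ∨ card.toList.count 'J' = 3)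
  else
    (level_strength.lookup type).isSome
instance (card : String) (type : Int) (level_strength : List (Int × String)) : Decidable (Pre_check_J card type level_strength) := by unfold Pre_check_J; infer_instance

def pvWitness_check_J : String × Int × (List (Int × String)) := ("JJ3QK", 1, [])

def Spec_check_J (card : String) (type : Int) (level_strength : List (Int × String)) (out : String) : Prop := out = check_J_alt card type level_strength
instance (card : String) (type : Int) (level_strength : List (Int × String)) (out : String) : Decidable (Spec_check_J card type level_strength out) := by unfold Spec_check_J; infer_instance

-- ===== CLAIM (what is proved, stated in full; the proofs are below) =====
def Claim_equal_check_J : Prop := ∀ (card : String) (type : Int) (level_strength : List (Int × String)), Dom_check_J card type level_strength → Pre_check_J card type level_strength → Spec_check_J card type level_strength (check_J card type level_strength)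

-- ===== LEMMAS AND PROOFS =====

-- the fuel-based substring counter, for a single-character needle, is List.count
theorem count_go_singleton (a : Char) (l : List Char) (fuel acc : Nat)
    (h : l.length ≤ fuel) :
    PySem.Chars.count.go [a] fuel l acc = acc + l.count a := by
  induction l generalizing fuel acc with
  | nil => cases fuel <;> simp [PySem.Chars.count.go]
  | cons c t ih =>
    cases fuel with
    | zero => simp at h
    | succ f =>
      have ht : t.length ≤ f := by simp only [List.length_cons] at h; omega
      rw [PySem.Chars.count.go]
      by_cases hca : a = c
      · subst hca
        have hp : ([a].isPrefixOf (a :: t)) = true := by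
          simp [List.isPrefixOf]
        simp only [hp, if_true, List.length_cons, List.length_nil, List.drop_succ_cons,
          List.drop_zero]
        rw [ih f (acc + 1) ht]
        simp
        omega
      · have hp : ([a].isPrefixOf (c :: t)) = false := by
          simp only [List.isPrefixOf, Bool.and_true,
            beq_eq_false_iff_ne, ne_eq]
          intro h'
          exact hca h'
        simp only [hp, Bool.false_eq_true, if_false]
        rw [ih f acc ht]
        have hac : ¬c = a := fun h' => hca h'.symm
        simp [hac]

theorem toList_J : ("J" : String).toList = ['J'] := by decide

theorem str_count_J (card : String) :
    PySem.Str.count card "J" = card.toList.count 'J' := by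
  unfold PySem.Str.count PySem.Chars.count
  rw [toList_J]
  simp only [List.isEmpty_cons, Bool.false_eq_true, if_false]
  simpa using count_go_singleton 'J' card.toList card.toList.length 0 le_rfl

theorem foldl_count_int (a : Char) (l : List Char) :
    l.foldl (fun n c => if c == a then n + 1 else n) (0 : Int) = (l.count a : Int) := by
  simpa using PySem.List.foldl_beq_add_one (l := l) (v := a) (a := (0 : Int))

theorem isIn_J (card : String) :
    PySem.Str.isIn "J" card = true ↔ 'J' ∈ card.toList := by
  unfold PySem.Str.isIn
  rw [toList_J, PySem.Chars.isIn_iff_infix]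
  constructor
  · rintro ⟨s, t, h⟩
    rw [← h]; simp
  · intro h
    obtain ⟨s, t, h⟩ := List.append_of_mem h
    exact ⟨s, t, by simp [h]⟩

-- ===== VERDICT (by name: the statement is the Claim_ definition above) =====
theorem check_J_spec : Claim_equal_check_J := by
  intro card type ls _hdom hpre
  unfold Pre_check_J at hpre
  simp only [Spec_check_J, check_J, check_J_alt, str_count_J, foldl_count_int]
  by_cases hmem : 'J' ∈ card.toList
  · rw [if_pos hmem] at hpre
    obtain ⟨h1, h2, h3, h4⟩ := hpre
    rw [if_pos ((isIn_J card).mpr hmem)]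
    set cnt := card.toList.count 'J' with hcnt
    have hpos : 1 ≤ cnt := List.count_pos_iff.mpr hmem
    have hne : ¬((cnt : Int) = 0) := fun h =>
      (Nat.pos_iff_ne_zero.mp hpos) (Int.natCast_eq_zero.mp h)
    rw [if_neg hne]
    by_cases ht1 : type = 1
    · subst ht1
      have hb : cnt ≤ 4 := h1 rfl
      interval_cases cnt <;> decide
    · by_cases ht2 : type = 2
      · subst ht2
        have hb : cnt ≤ 2 := h2 rfl
        interval_cases cnt <;> decide
      · by_cases ht3 : type = 3
        · subst ht3
          have hb : cnt ≤ 2 := h3 rfl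
          interval_cases cnt <;> decide
        · by_cases ht4 : type = 4
          · subst ht4
            rcases h4 rfl with h | h <;> rw [h] <;> decide
          · rw [if_neg ht1, if_neg ht2, if_neg ht3, if_neg ht4]
            have hl : ([(1, [1, 1, 1, 1, 1]), (2, [2, 1, 1, 1]), (3, [2, 2, 1]),
                (4, [3, 1, 1])] : List (Int × List Int)).lookup type = none := by
              simp [ht1, ht2, ht3, ht4]
            rw [hl]
  · have hz : card.toList.count 'J' = 0 := List.count_eq_zero.mpr hmem
    rw [if_neg (fun hin => hmem ((isIn_J card).mp hin)), hz]
    simp
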